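-- pv_equiv track=rewrite | github.com/LucasVelimirovici/GA-for-DC-trading | Long_implementation.py | NDC
-- ===== SOURCE A (Python) =====
-- from collections import Counter
--
-- def NDC(data,pricedata,thresh,period):
--   serie=[]
--
--   for i in range(len(data)):
--     try:
--       rang=data[i-period+1:i+1]
--       serie.append(Counter(rang)["UpC"]+Counter(rang)["DownC"])
--     except:
--       serie.append(None)
--   return serie
-- ===== SOURCE B (Python) =====
-- def NDC(data, pricedata, thresh, period):
--     n = len(data)
--     # prefix counts of UpC/DownC tokens: pre[k] = count in data[:k]
--     pre = [0]
--     for x in data: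
--         pre.append(pre[-1] + (x == "UpC" or x == "DownC"))
--     serie = []
--     for i in range(n):
--         start = i - period + 1
--         # replicate Python slice-bound normalisation of data[start:i+1]
--         if start < 0:
--             start = max(n + start, 0)
--         else:
--             start = min(start, n)
--         stop = i + 1
--         serie.append(pre[stop] - pre[start] if start < stop else 0)
--     return serie
-- ===== Notes on version B (the rewrite author's own statement) =====
-- stated objective: faster
-- what changed: Replaces the per-index slice + two Counter builds (O(n*period)) by one prefix-count array queried in O(1) per index, with Python's slice-bound normalisation (negative start wraps, clamping) computed arithmetically.
import Mathlib
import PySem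

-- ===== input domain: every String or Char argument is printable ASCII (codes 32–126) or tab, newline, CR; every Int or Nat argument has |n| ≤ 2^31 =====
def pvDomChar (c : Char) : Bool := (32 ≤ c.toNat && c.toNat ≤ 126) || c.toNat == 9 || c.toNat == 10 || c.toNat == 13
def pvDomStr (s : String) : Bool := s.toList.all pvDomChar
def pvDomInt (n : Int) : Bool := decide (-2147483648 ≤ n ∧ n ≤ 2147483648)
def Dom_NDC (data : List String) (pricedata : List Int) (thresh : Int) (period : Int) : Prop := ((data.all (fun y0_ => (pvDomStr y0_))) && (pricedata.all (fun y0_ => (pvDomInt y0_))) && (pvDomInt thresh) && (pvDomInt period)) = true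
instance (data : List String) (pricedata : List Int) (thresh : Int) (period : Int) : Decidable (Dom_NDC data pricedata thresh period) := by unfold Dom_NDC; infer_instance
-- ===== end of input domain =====

-- B replaces A's per-index slice + two Counter builds by one prefix-count list with O(1) window queries (objective: faster).

-- ===== PORT A =====
-- (A's 'try' body never raises: slicing and Counter lookups are total, so the 'except' branch is dead and A is total)
def NDC (data : List String) (pricedata : List Int) (thresh : Int) (period : Int) : List Int :=
  (PySem.List.pyRange 0 (data.length : Int) 1).foldl
    (fun serie i =>
      let rang := PySem.List.slice data (some (i - period + 1)) (some (i + 1))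
      serie ++ [(PySem.Dict.counter rang).getD "UpC" 0 + (PySem.Dict.counter rang).getD "DownC" 0])
    []

-- ===== PORT B =====
def NDC_alt (data : List String) (pricedata : List Int) (thresh : Int) (period : Int) : List Int :=
  let n : Int := (data.length : Int)
  let pre : List Int :=
    data.foldl (fun pl x => pl ++ [pl.getLastD 0 + (if x = "UpC" ∨ x = "DownC" then (1 : Int) else 0)]) [0]
  (PySem.List.pyRange 0 n 1).foldl
    (fun serie i =>
      let start0 := i - period + 1
      let start := if start0 < 0 then max (n + start0) 0 else min start0 n
      let stop := i + 1
      serie ++ [if start < stop then pre.getD stop.toNat 0 - pre.getD start.toNat 0 else 0])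
    []

-- ===== PRECONDITION & SPEC =====
def Spec_NDC (data : List String) (pricedata : List Int) (thresh : Int) (period : Int) (out : List Int) : Prop := out = NDC_alt data pricedata thresh period
instance (data : List String) (pricedata : List Int) (thresh : Int) (period : Int) (out : List Int) : Decidable (Spec_NDC data pricedata thresh period out) := by unfold Spec_NDC; infer_instance

-- ===== CLAIM (what is proved, stated in full; the proofs are below) =====
def Claim_equal_NDC : Prop := ∀ (data : List String) (pricedata : List Int) (thresh : Int) (period : Int), Dom_NDC data pricedata thresh period → Spec_NDC data pricedata thresh period (NDC data pricedata thresh period)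

-- ===== LEMMAS AND PROOFS =====

-- the window predicate both programs count
def pvWin (x : String) : Bool := decide (x = "UpC" ∨ x = "DownC")

-- A's two Counter lookups sum to a single countP
lemma count_split (l : List String) :
    (l.count "UpC" : Int) + (l.count "DownC" : Int) = (l.countP pvWin : Int) := by
  have h : l.count "UpC" + l.count "DownC" = l.countP pvWin := by
    induction l with
    | nil => simp
    | cons x t ih =>
      by_cases h1 : x = "UpC" <;> by_cases h2 : x = "DownC" <;>
        simp [pvWin, h1, h2] <;> omega
  exact_mod_cast congrArg (Nat.cast (R := Int)) h

-- clampIdx written out (rfl to PySem's definition)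
lemma clampIdx_eq (n : Nat) (i : Int) :
    PySem.List.clampIdx n i
      = if i < 0 then (if (n : Int) + i < 0 then 0 else ((n : Int) + i).toNat) else min i.toNat n := rfl

lemma clampIdx_stop (n : Nat) (i : Int) (hi0 : 0 ≤ i) (hin : i < (n : Int)) :
    PySem.List.clampIdx n (i + 1) = i.toNat + 1 := by
  rw [clampIdx_eq]; split_ifs <;> omega

-- B's arithmetic start normalisation equals Python's slice clamp
lemma start_eq (n : Nat) (s : Int) :
    (if s < 0 then max ((n : Int) + s) 0 else min s (n : Int)).toNat = PySem.List.clampIdx n s := by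
  rw [clampIdx_eq]; split_ifs <;> omega

lemma start_lt (n : Nat) (s i : Int) (hi0 : 0 ≤ i) :
    ((if s < 0 then max ((n : Int) + s) 0 else min s (n : Int)) < i + 1)
      ↔ PySem.List.clampIdx n s < i.toNat + 1 := by
  rw [clampIdx_eq]; split_ifs <;> omega

lemma clampIdx_le' (n : Nat) (s : Int) : PySem.List.clampIdx n s ≤ n := by
  rw [clampIdx_eq]; split_ifs <;> omega

-- B's prefix loop builds exactly the list of prefix counts
lemma fold_pre (xs : List String) (acc : List Int) :
    xs.foldl (fun pl x => pl ++ [pl.getLastD 0 + (if x = "UpC" ∨ x = "DownC" then (1 : Int) else 0)]) acc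
      = acc ++ (List.range xs.length).map
          (fun j => acc.getLastD 0 + ((xs.take (j + 1)).countP pvWin : Int)) := by
  induction xs generalizing acc with
  | nil => simp
  | cons x t ih =>
    rw [List.foldl_cons, ih]
    simp only [List.length_cons, List.range_succ_eq_map, List.map_cons, List.map_map,
      List.getLastD_concat, List.append_assoc, List.singleton_append]
    have e0 : acc.getLastD 0 + (if x = "UpC" ∨ x = "DownC" then (1 : Int) else 0)
        = acc.getLastD 0 + (((x :: t).take (0 + 1)).countP pvWin : Int) := by
      simp [pvWin, List.countP_cons]
    have e1 : List.map (fun j => acc.getLastD 0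
          + (if x = "UpC" ∨ x = "DownC" then (1 : Int) else 0) + ((t.take (j + 1)).countP pvWin : Int))
          (List.range t.length)
        = List.map ((fun j => acc.getLastD 0 + (((x :: t).take (j + 1)).countP pvWin : Int)) ∘ Nat.succ)
          (List.range t.length) := by
      apply List.map_congr_left
      intro j _
      simp only [Function.comp, List.take_succ_cons, List.countP_cons, pvWin]
      by_cases hx : x = "UpC" ∨ x = "DownC" <;> simp [hx] <;> ring
    rw [e1]
    congr 1
    rw [e0]

lemma pre_getD (data : List String) (k : Nat) (hk : k ≤ data.length) :
    (data.foldl (fun pl x => pl ++ [pl.getLastD 0 + (if x = "UpC" ∨ x = "DownC" then (1 : Int) else 0)]) [0]).getD k 0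
      = ((data.take k).countP pvWin : Int) := by
  rw [fold_pre]
  cases k with
  | zero => simp
  | succ m =>
    have hm : m < data.length := by omega
    simp [List.getD_eq_getElem?_getD, List.getElem?_map, List.getElem?_range hm]

-- the count over a slice window is a difference of prefix counts
lemma window_count (xs : List String) (a b : Nat) (hab : a ≤ b) :
    (((xs.drop a).take (b - a)).countP pvWin : Int)
      = ((xs.take b).countP pvWin : Int) - ((xs.take a).countP pvWin : Int) := by
  have h1 : (xs.take b).drop a = (xs.drop a).take (b - a) := List.drop_take ..
  have h2 : xs.take b = xs.take a ++ (xs.take b).drop a := by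
    conv_lhs => rw [← List.take_append_drop a (xs.take b), List.take_take, Nat.min_eq_left hab]
  have h3 := List.countP_append (l₁ := xs.take a) (l₂ := (xs.take b).drop a) (p := pvWin)
  rw [← h2] at h3
  rw [← h1, h3]
  push_cast
  ring

-- ===== VERDICT (by name: the statement is the Claim_ definition above) =====
theorem NDC_spec : Claim_equal_NDC := by
  intro data pricedata thresh period _
  unfold Spec_NDC NDC NDC_alt
  rw [PySem.List.foldl_append_singleton_eq_map, PySem.List.foldl_append_singleton_eq_map,
    List.nil_append, List.nil_append]
  apply List.map_congr_left
  intro i hi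
  obtain ⟨hi0, hin⟩ := PySem.List.mem_pyRange_one.mp hi
  simp only [PySem.Dict.getD_counter, PySem.List.slice, count_split]
  rw [clampIdx_stop data.length i hi0 hin]
  have hstop : (i + 1).toNat = i.toNat + 1 := by omega
  simp only [start_eq, start_lt data.length (i - period + 1) i hi0, hstop]
  rw [pre_getD data (i.toNat + 1) (by omega),
    pre_getD data (PySem.List.clampIdx data.length (i - period + 1)) (clampIdx_le' ..)]
  by_cases h : PySem.List.clampIdx data.length (i - period + 1) < i.toNat + 1
  · rw [if_pos h]
    exact window_count data _ _ (le_of_lt h)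
  · rw [if_neg h]
    have h0 : i.toNat + 1 - PySem.List.clampIdx data.length (i - period + 1) = 0 := by omega
    rw [h0]
    simp
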